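-- pv_equiv track=rewrite | github.com/zackjohnson298/AdventOfCode | 2023/Day7/Part2.py | calculate_4card_strength
-- ===== SOURCE A (Python) =====
-- from typing import List, Tuple, Dict
--
-- def calculate_4card_strength(cards: List[str]) -> int:
--     assert len(cards) == 4
--     card_set = set(cards)
--     if len(card_set) == 1:
--         strength = 7
--     elif len(card_set) == 2:
--         if cards.count(cards[0]) in (3, 1):
--             strength = 6
--         elif cards.count(cards[0]) == 2:
--             strength = 5
--         else:
--             raise Exception(f'Unhandled state 1J len 2: {cards}')
--     elif len(card_set) == 3:
--         a, b, c = [card for card in sorted(card_set, key=lambda card: cards.count(card))]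
--         if cards.count(a) == 1 and cards.count(b) == 1 and cards.count(c) == 2:
--             strength = 4
--         else:
--             raise Exception(f'Unhandled state 1J len 3: {cards}')
--     elif len(card_set) == 4:
--         strength = 2
--     else:
--         raise Exception(f'Unhandled final state 1J: {cards}')
--     return strength
-- ===== SOURCE B (Python) =====
-- from typing import List
--
-- _STRENGTH = {(4,): 7, (3, 1): 6, (2, 2): 5, (2, 1, 1): 4, (1, 1, 1, 1): 2}
--
-- def calculate_4card_strength(cards: List[str]) -> int:
--     assert len(cards) == 4
--     counts = {}
--     for card in cards:
--         counts[card] = counts.get(card, 0) + 1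
--     signature = tuple(sorted(counts.values(), reverse=True))
--     return _STRENGTH[signature]
-- ===== Notes on version B (the rewrite author's own statement) =====
-- stated objective: simpler
-- what changed: Replaces the len(set)-based branch tree with repeated cards.count scans by one frequency table whose sorted value-signature is looked up in a five-entry strength dict.
import Mathlib
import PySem

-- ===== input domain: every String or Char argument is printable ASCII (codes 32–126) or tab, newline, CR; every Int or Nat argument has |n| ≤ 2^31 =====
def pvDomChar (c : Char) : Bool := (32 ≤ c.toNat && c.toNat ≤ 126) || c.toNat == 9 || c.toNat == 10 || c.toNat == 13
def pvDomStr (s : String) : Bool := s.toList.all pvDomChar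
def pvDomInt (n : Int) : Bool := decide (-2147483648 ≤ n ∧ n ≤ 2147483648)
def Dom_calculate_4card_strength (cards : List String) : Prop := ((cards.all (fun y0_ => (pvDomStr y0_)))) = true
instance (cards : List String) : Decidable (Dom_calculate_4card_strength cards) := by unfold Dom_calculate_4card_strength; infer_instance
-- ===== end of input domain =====

-- B replaces A's len(set)-branch tree and repeated .count scans by a frequency table plus a
-- sorted-signature lookup (objective: simpler). Equivalence is claimed on hands of exactly 4 cards
-- (A's assert). Inside that precondition A's 'raise Exception' branches are unreachable.

-- ===== PORT A =====
def calculate_4card_strength (cards : List String) : Int :=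
  -- 'assert len(cards) == 4' raises AssertionError otherwise; those inputs are outside Pre_
  if cards.length ≠ 4 then 0
  else
    let card_set : PySem.Set String := PySem.Set.ofList cards
    if card_set.length = 1 then 7
    else if card_set.length = 2 then
      let c0 := (PySem.List.pyGet? cards 0).getD ""
      if PySem.List.count cards c0 = 3 ∨ PySem.List.count cards c0 = 1 then 6
      else if PySem.List.count cards c0 = 2 then 5
      else 0  -- 'raise Exception' (unreachable for 4-card hands)
    else if card_set.length = 3 then
      match PySem.List.sorted card_set (fun card => (PySem.List.count cards card : Int)) with
      | [a, b, c] =>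
        if PySem.List.count cards a = 1 ∧ PySem.List.count cards b = 1 ∧
            PySem.List.count cards c = 2 then 4
        else 0  -- 'raise Exception' (unreachable for 4-card hands)
      | _ => 0   -- unpacking 'a, b, c = …' fails (unreachable: the set has 3 elements)
    else if card_set.length = 4 then 2
    else 0  -- 'raise Exception' (unreachable)

-- ===== PORT B =====
def pvStrengthTable : PySem.Dict (List Int) Int :=
  PySem.Dict.ofList [([4], 7), ([3, 1], 6), ([2, 2], 5), ([2, 1, 1], 4), ([1, 1, 1, 1], 2)]

def calculate_4card_strength_alt (cards : List String) : Int :=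
  if cards.length ≠ 4 then 0  -- 'assert' fails; outside Pre_
  else
    let counts : PySem.Dict String Int :=
      cards.foldl (fun d card => d.insert card (d.getD card 0 + 1)) PySem.Dict.empty
    let signature := PySem.List.sorted counts.values (fun v => v) true
    pvStrengthTable.getD signature 0  -- KeyError impossible: every 4-card signature is in the table

-- ===== PRECONDITION & SPEC =====
-- Pre_ excludes exactly the inputs where A's 'assert len(cards) == 4' raises AssertionError.
def Pre_calculate_4card_strength (cards : List String) : Prop := cards.length = 4
instance (cards : List String) : Decidable (Pre_calculate_4card_strength cards) := by
  unfold Pre_calculate_4card_strength; infer_instance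
def pvWitness_calculate_4card_strength : List String := ["A", "A", "7", "K"]
def Spec_calculate_4card_strength (cards : List String) (out : Int) : Prop := out = calculate_4card_strength_alt cards
instance (cards : List String) (out : Int) : Decidable (Spec_calculate_4card_strength cards out) := by unfold Spec_calculate_4card_strength; infer_instance

-- ===== CLAIM (what is proved, stated in full; the proofs are below) =====
def Claim_equal_calculate_4card_strength : Prop := ∀ (cards : List String), Dom_calculate_4card_strength cards → Pre_calculate_4card_strength cards → Spec_calculate_4card_strength cards (calculate_4card_strength cards)

-- ===== LEMMAS AND PROOFS =====

-- ===== VERDICT (by name: the statement is the Claim_ definition above) =====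
set_option maxHeartbeats 2000000 in
theorem calculate_4card_strength_spec : Claim_equal_calculate_4card_strength := by
  intro cards _ hpre
  unfold Spec_calculate_4card_strength
  match cards, hpre with
  | [a, b, c, d], _ =>
    by_cases h1 : b = a <;> by_cases h2 : c = a <;> by_cases h3 : d = a <;>
      by_cases h4 : c = b <;> by_cases h5 : d = b <;> by_cases h6 : d = c <;>
      subst_vars <;>
      (try have h1' := Ne.symm h1) <;> (try have h2' := Ne.symm h2) <;>
      (try have h3' := Ne.symm h3) <;> (try have h4' := Ne.symm h4) <;>
      (try have h5' := Ne.symm h5) <;> (try have h6' := Ne.symm h6) <;>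
      (try simp_all [calculate_4card_strength, calculate_4card_strength_alt, pvStrengthTable,
        PySem.Set.ofList, PySem.Set.add, PySem.Set.contains,
        PySem.List.sorted, PySem.List.insertBy, PySem.List.pyGet?, PySem.List.pyIdx?,
        PySem.Dict.insert, PySem.Dict.getD, PySem.Dict.get?, PySem.Dict.update,
        PySem.Dict.values, PySem.Dict.empty, PySem.Dict.ofList,
        List.count_cons, List.count_nil])
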